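-- pv_equiv track=rewrite | github.com/HaydenInEdinburgh/LintCode | 1168_array_score.py | arrayScore
-- ===== SOURCE A (Python) =====
-- def arrayScore(nums, k, ue, le):
--     # write your code here.
--     if not nums:
--         return 0
--
--     l, r = 0, 0
--     curSum = 0
--     score = 0
--
--     while r < len(nums):
--         length = r-l
--         if length <k:
--             curSum += nums[r]
--         elif length == k:
--             #calculate score
--             if curSum < ue:
--                 score += 1
--             if curSum > le:
--                 score -= 1
--             curSum += nums[r]
--             curSum -= nums[l]
--             l += 1
--         r += 1
--
--     if curSum < ue:
--         score += 1
--     if curSum > le: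
--         score -= 1
--
--     return score
-- ===== SOURCE B (Python) =====
-- def arrayScore(nums, k, ue, le):
--     if not nums:
--         return 0
--     n = len(nums)
--     prefix = [0]
--     for x in nums:
--         prefix.append(prefix[-1] + x)
--     if n < k:
--         sums = [prefix[n]]
--     else:
--         sums = [prefix[i + k] - prefix[i] for i in range(n - k + 1)]
--     return sum((1 if s < ue else 0) + (-1 if s > le else 0) for s in sums)
-- ===== Notes on version B (the rewrite author's own statement) =====
-- stated objective: simpler
-- what changed: Replaces the two-pointer sliding-window mutation loop by a prefix-sum array from which each window sum is read off as P[i+k]-P[i], then sums the per-window scores in one comprehension.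
-- outside the precondition, e.g. on arrayScore([1], -1, 5, -5): A returns 0, B raises IndexError
import Mathlib
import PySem

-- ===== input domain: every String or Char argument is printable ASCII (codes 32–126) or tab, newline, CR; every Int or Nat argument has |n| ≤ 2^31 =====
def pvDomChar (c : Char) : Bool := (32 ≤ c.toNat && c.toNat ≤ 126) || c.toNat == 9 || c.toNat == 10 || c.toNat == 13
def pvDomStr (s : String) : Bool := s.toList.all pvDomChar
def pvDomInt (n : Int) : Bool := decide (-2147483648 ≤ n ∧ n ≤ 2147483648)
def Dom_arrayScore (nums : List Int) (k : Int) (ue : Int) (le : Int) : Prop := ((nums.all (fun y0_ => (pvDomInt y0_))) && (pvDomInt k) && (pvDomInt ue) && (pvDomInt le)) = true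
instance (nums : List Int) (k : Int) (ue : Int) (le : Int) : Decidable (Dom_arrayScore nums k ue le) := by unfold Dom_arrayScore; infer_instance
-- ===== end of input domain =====

-- B replaces A's two-pointer sliding-window loop by a prefix-sum array and a per-window score sum (simpler; return value only).


-- ===== PORT A =====
-- the while loop (r goes 0,1,…,len-1) is ported as a foldl over List.range; state = (l, curSum, score)
def arrayScore (nums : List Int) (k : Int) (ue : Int) (le : Int) : Int :=
  if nums = [] then 0
  else
    let st := (List.range nums.length).foldl (fun (st : Int × Int × Int) (r : Nat) =>
      let l := st.1
      let curSum := st.2.1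
      let score := st.2.2
      let length := (r : Int) - l
      if length < k then
        (l, curSum + PySem.List.pyGetD nums (r : Int) 0, score)
      else if length = k then
        let score1 := if curSum < ue then score + 1 else score
        let score2 := if curSum > le then score1 - 1 else score1
        (l + 1, curSum + PySem.List.pyGetD nums (r : Int) 0 - PySem.List.pyGetD nums l 0, score2)
      else (l, curSum, score)) ((0 : Int), (0 : Int), (0 : Int))
    let score1 := if st.2.1 < ue then st.2.2 + 1 else st.2.2
    if st.2.1 > le then score1 - 1 else score1

-- ===== PORT B =====
def arrayScore_alt (nums : List Int) (k : Int) (ue : Int) (le : Int) : Int :=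
  if nums = [] then 0
  else
    let n : Int := nums.length
    let pfx := nums.foldl (fun acc x => acc ++ [PySem.List.pyGetD acc (-1) 0 + x]) ([0] : List Int)
    let sums :=
      if n < k then [PySem.List.pyGetD pfx n 0]
      else (PySem.List.pyRange 0 (n - k + 1) 1).map
        (fun i => PySem.List.pyGetD pfx (i + k) 0 - PySem.List.pyGetD pfx i 0)
    (sums.map (fun s => (if s < ue then (1 : Int) else 0) + (if s > le then (-1 : Int) else 0))).sum

-- ===== PRECONDITION & SPEC =====
-- Pre_ excludes k < 0 on nonempty input (not a window size): there A's loop body never fires and it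
-- accidentally scores the leftover sum 0 once, while B's prefix-index arithmetic raises IndexError.
def Pre_arrayScore (nums : List Int) (k : Int) (ue : Int) (le : Int) : Prop := nums = [] ∨ 0 ≤ k
instance (nums : List Int) (k : Int) (ue : Int) (le : Int) : Decidable (Pre_arrayScore nums k ue le) := by unfold Pre_arrayScore; infer_instance
def pvWitness_arrayScore : List Int × Int × Int × Int := ([1, 2, 3], 2, 4, 1)
def Spec_arrayScore (nums : List Int) (k : Int) (ue : Int) (le : Int) (out : Int) : Prop := out = arrayScore_alt nums k ue le
instance (nums : List Int) (k : Int) (ue : Int) (le : Int) (out : Int) : Decidable (Spec_arrayScore nums k ue le out) := by unfold Spec_arrayScore; infer_instance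

-- ===== CLAIM (what is proved, stated in full; the proofs are below) =====
def Claim_equal_arrayScore : Prop := ∀ (nums : List Int) (k : Int) (ue : Int) (le : Int), Dom_arrayScore nums k ue le → Pre_arrayScore nums k ue le → Spec_arrayScore nums k ue le (arrayScore nums k ue le)

-- ===== LEMMAS AND PROOFS =====

-- prefix sum of the first i elements
def pref (nums : List Int) (i : Nat) : Int := (nums.take i).sum

-- the score contribution of one window sum
def scOf (ue le s : Int) : Int := (if s < ue then 1 else 0) + (if s > le then -1 else 0)

theorem pref_succ (nums : List Int) (r : Nat) (h : r < nums.length) :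
    pref nums (r + 1) = pref nums r + nums[r] := by
  unfold pref
  rw [List.take_add_one, List.sum_append]
  simp [List.getElem?_eq_getElem h]

theorem score_step (ue le s sc : Int) :
    (if s > le then (if s < ue then sc + 1 else sc) - 1 else (if s < ue then sc + 1 else sc))
      = sc + scOf ue le s := by
  unfold scOf; split_ifs <;> ring

-- B's prefix-building fold, characterised
theorem foldl_prefix (l : List Int) : ∀ (pre : List Int) (s : Int),
    PySem.List.pyGetD pre (-1) 0 = s →
    l.foldl (fun acc x => acc ++ [PySem.List.pyGetD acc (-1) 0 + x]) pre
      = pre ++ (List.range l.length).map (fun i => s + (l.take (i + 1)).sum) := by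
  induction l with
  | nil => intro pre s _; simp
  | cons x xs ih =>
    intro pre s hs
    have h2 : PySem.List.pyGetD (pre ++ [s + x]) (-1) 0 = s + x :=
      PySem.List.pyGetD_neg_one_append_singleton pre (s + x) 0
    simp only [List.foldl_cons, hs]
    rw [ih (pre ++ [s + x]) (s + x) h2]
    rw [List.append_assoc]
    congr 1
    rw [List.length_cons, List.range_succ_eq_map]
    simp only [List.map_cons, List.map_map, Function.comp_def, List.singleton_append]
    refine congrArg₂ List.cons (by simp) ?_
    exact List.map_congr_left (fun i _ => by simp [List.take_succ_cons, add_assoc])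

theorem prefix_eq (nums : List Int) :
    nums.foldl (fun acc x => acc ++ [PySem.List.pyGetD acc (-1) 0 + x]) ([0] : List Int)
      = (List.range (nums.length + 1)).map (pref nums) := by
  rw [foldl_prefix nums [0] 0 (by decide)]
  simp [List.range_succ_eq_map, pref, List.map_map, Function.comp]

theorem pyGetD_prefix (nums : List Int) (m : Nat) (hm : m ≤ nums.length) :
    PySem.List.pyGetD ((List.range (nums.length + 1)).map (pref nums)) (m : Int) 0 = pref nums m := by
  rw [PySem.List.pyGetD_natCast]
  rw [List.getD_eq_getElem?_getD]
  rw [List.getElem?_map]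
  simp [List.getElem?_range (by omega : m < nums.length + 1)]

-- A's loop invariant
theorem loopA (nums : List Int) (kN : Nat) (ue le : Int) :
    ∀ (r : Nat), r ≤ nums.length →
    (List.range r).foldl (fun (st : Int × Int × Int) (r : Nat) =>
      let l := st.1
      let curSum := st.2.1
      let score := st.2.2
      let length := (r : Int) - l
      if length < (kN : Int) then
        (l, curSum + PySem.List.pyGetD nums (r : Int) 0, score)
      else if length = (kN : Int) then
        let score1 := if curSum < ue then score + 1 else score
        let score2 := if curSum > le then score1 - 1 else score1
        (l + 1, curSum + PySem.List.pyGetD nums (r : Int) 0 - PySem.List.pyGetD nums l 0, score2)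
      else (l, curSum, score)) ((0 : Int), (0 : Int), (0 : Int))
    = (((r - kN : Nat) : Int), pref nums r - pref nums (r - kN),
        ((List.range (r - kN)).map (fun j => scOf ue le (pref nums (j + kN) - pref nums j))).sum) := by
  intro r
  induction r with
  | zero => intro _; simp [pref]
  | succ r ih =>
    intro hr
    have hrn : r < nums.length := by omega
    rw [List.range_succ, List.foldl_append, ih (by omega)]
    simp only [List.foldl_cons, List.foldl_nil]
    by_cases hlt : r < kN
    · have h1 : ((r : Int) - ((r - kN : Nat) : Int)) < (kN : Int) := by
        have : (r - kN : Nat) = 0 := by omega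
        rw [this]; push_cast; omega
      rw [if_pos h1]
      have h0 : (r - kN : Nat) = 0 := by omega
      have h0' : (r + 1 - kN : Nat) = 0 := by omega
      simp only [h0, h0']
      rw [PySem.List.pyGetD_natCast]
      simp [pref_succ nums r hrn, List.getD_eq_getElem?_getD, List.getElem?_eq_getElem hrn]
      ring
    · have hsub : ((r + 1 - kN : Nat) : Int) = ((r - kN : Nat) : Int) + 1 := by omega
      have hcast : ((r : Int) - ((r - kN : Nat) : Int)) = (kN : Int) := by omega
      rw [if_neg (by omega), if_pos hcast]
      have hl : (r - kN : Nat) < nums.length := by omega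
      have hget : PySem.List.pyGetD nums (((r - kN : Nat) : Int)) 0 = nums[(r - kN : Nat)] := by
        rw [PySem.List.pyGetD_natCast]
        simp [List.getD_eq_getElem?_getD, List.getElem?_eq_getElem hl]
      have hgetr : PySem.List.pyGetD nums ((r : Nat) : Int) 0 = nums[r] := by
        rw [PySem.List.pyGetD_natCast]
        simp [List.getD_eq_getElem?_getD, List.getElem?_eq_getElem hrn]
      refine Prod.ext ?_ (Prod.ext ?_ ?_)
      · simp [hsub]
      · dsimp only
        rw [hget, hgetr]
        have e1 := pref_succ nums r hrn
        have e2 := pref_succ nums (r - kN) hl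
        have e3 : r - kN + 1 = r + 1 - kN := by omega
        rw [e3] at e2
        rw [e1, e2]; ring
      · dsimp only
        rw [score_step ue le (pref nums r - pref nums (r - kN))]
        have e4 : r + 1 - kN = (r - kN) + 1 := by omega
        rw [e4, List.range_succ, List.map_append, List.sum_append]
        have e5 : (r - kN) + kN = r := by omega
        simp [e5]

theorem arrayScore_eq (nums : List Int) (k ue le : Int) (hk : 0 ≤ k) :
    arrayScore nums k ue le = arrayScore_alt nums k ue le := by
  by_cases hnil : nums = []
  · simp [arrayScore, arrayScore_alt, hnil]
  · obtain ⟨kN, rfl⟩ : ∃ kN : Nat, k = (kN : Int) := ⟨k.toNat, (Int.toNat_of_nonneg hk).symm⟩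
    unfold arrayScore arrayScore_alt
    rw [if_neg hnil, if_neg hnil]
    simp only [prefix_eq nums]
    set n := nums.length with hn
    have hn0 : 0 < n := List.length_pos_iff.mpr hnil
    rw [loopA nums kN ue le n (le_refl n)]
    dsimp only
    rw [score_step ue le (pref nums n - pref nums (n - kN))]
    by_cases hnk : (n : Int) < (kN : Int)
    · rw [if_pos hnk]
      have h1 : n - kN = 0 := by omega
      rw [h1]
      rw [pyGetD_prefix nums n (le_refl n)]
      simp [pref, scOf]
    · rw [if_neg hnk]
      have hkn : kN ≤ n := by omega
      have hrange : PySem.List.pyRange 0 ((n : Int) - (kN : Int) + 1) 1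
          = List.map (fun j : Nat => (j : Int)) (List.range (n - kN + 1)) := by
        have h0 : ((n : Int) - (kN : Int) + 1) = ((n - kN + 1 : Nat) : Int) := by omega
        rw [h0]
        exact PySem.List.pyRange_zero_nat (n - kN + 1)
      rw [hrange, List.map_map, List.map_map]
      refine Eq.trans (b :=
          (List.map (fun j => scOf ue le (pref nums (j + kN) - pref nums j))
            (List.range (n - kN + 1))).sum) ?_ ?_
      · rw [List.range_succ, List.map_append, List.sum_append]
        have e5 : n - kN + kN = n := by omega
        simp [e5]
      · refine congrArg List.sum (List.map_congr_left ?_)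
        intro j hj
        rw [List.mem_range] at hj
        have h1 : ((j : Int) + (kN : Int)) = ((j + kN : Nat) : Int) := by push_cast; ring
        simp only [Function.comp_apply, Function.comp_def]
        rw [h1, pyGetD_prefix nums (j + kN) (by omega), pyGetD_prefix nums j (by omega)]
        rfl

-- ===== VERDICT (by name: the statement is the Claim_ definition above) =====
theorem arrayScore_spec : Claim_equal_arrayScore := by
  intro nums k ue le _ hk
  unfold Spec_arrayScore
  rcases hk with hnil | hk
  · simp [arrayScore, arrayScore_alt, hnil]
  · exact arrayScore_eq nums k ue le hk
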